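-- pv_equiv track=rewrite | github.com/believeelikem/django-htmx-ecommerce | shop/utils.py | get_variant
-- ===== SOURCE A (Python) =====
-- def get_variant(details, color, size):
--     if not all([color,size]):
--         return details[0]
--
--     for detail in details:
--         if detail["color"] == color and detail["size"] == size:
--             return detail
--
--     for detail in details:
--         if detail["color"] == color:
--             return detail
-- ===== SOURCE B (Python) =====
-- def get_variant(details, color, size):
--     if not all([color, size]):
--         return details[0]
--     fallback = None
--     for detail in details:
--         if detail["color"] == color:
--             if detail["size"] == size:
--                 return detail
--             if fallback is None:
--                 fallback = detail
--     return fallback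
-- ===== Notes on version B (the rewrite author's own statement) =====
-- stated objective: simpler
-- what changed: replaces A's two sequential scans (exact match, then color-only) by one single pass that returns an exact match immediately and remembers the first color-only candidate as a fallback
import Mathlib
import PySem

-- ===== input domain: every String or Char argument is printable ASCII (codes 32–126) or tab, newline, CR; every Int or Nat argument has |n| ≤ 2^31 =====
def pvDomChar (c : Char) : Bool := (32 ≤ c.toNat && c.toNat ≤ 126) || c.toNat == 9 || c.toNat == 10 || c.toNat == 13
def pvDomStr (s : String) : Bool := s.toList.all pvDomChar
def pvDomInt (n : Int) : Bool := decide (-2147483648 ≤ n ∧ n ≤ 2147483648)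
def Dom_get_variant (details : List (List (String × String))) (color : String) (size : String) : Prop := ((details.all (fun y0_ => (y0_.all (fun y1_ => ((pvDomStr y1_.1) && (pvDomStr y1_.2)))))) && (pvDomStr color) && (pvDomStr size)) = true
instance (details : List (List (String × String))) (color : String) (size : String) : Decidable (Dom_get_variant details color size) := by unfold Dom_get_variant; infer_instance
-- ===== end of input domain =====

-- B replaces A's two sequential scans by one single pass that returns an exact
-- match immediately and remembers the first color-only candidate as a fallback
-- (objective: simpler).

-- ===== PORT A =====
-- detail["color"] (dict lookup, KeyError = none, excluded by Pre_)
def pvDget (d : List (String × String)) (k : String) : Option String :=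
  (PySem.Dict.mk d).get? k

-- first loop of A: return detail whose color AND size match
def pvLoop1 (details : List (List (String × String))) (color : String) (size : String) :
    Option (List (String × String)) :=
  match details with
  | [] => none
  | d :: rest =>
    if pvDget d "color" == some color && pvDget d "size" == some size then some d
    else pvLoop1 rest color size

-- second loop of A: return detail whose color matches
def pvLoop2 (details : List (List (String × String))) (color : String) :
    Option (List (String × String)) :=
  match details with
  | [] => none
  | d :: rest =>
    if pvDget d "color" == some color then some d
    else pvLoop2 rest color

def get_variant (details : List (List (String × String))) (color : String) (size : String) :
    Option (List (String × String)) :=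
  if color = "" ∨ size = "" then PySem.List.pyGet? details 0
  else
    match pvLoop1 details color size with
    | some d => some d
    | none => pvLoop2 details color

-- ===== PORT B =====
-- single pass with a fallback accumulator (Source B's loop)
def pvGo (details : List (List (String × String))) (color : String) (size : String)
    (fallback : Option (List (String × String))) : Option (List (String × String)) :=
  match details with
  | [] => fallback
  | d :: rest =>
    if pvDget d "color" == some color then
      if pvDget d "size" == some size then some d
      else pvGo rest color size (if fallback.isNone then some d else fallback)
    else pvGo rest color size fallback

def get_variant_alt (details : List (List (String × String))) (color : String) (size : String) :
    Option (List (String × String)) :=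
  if color = "" ∨ size = "" then PySem.List.pyGet? details 0
  else pvGo details color size none

-- ===== PRECONDITION & SPEC =====
-- Pre_ excludes exactly the inputs on which A raises: empty `details` when color or
-- size is falsy (IndexError on details[0]); otherwise a scan that, before any exact
-- match, reaches a dict missing the "color" key or missing "size" on a color match
-- (KeyError).
def pvOk (d : List (String × String)) (color : String) : Bool :=
  (pvDget d "color").isSome &&
    (!(pvDget d "color" == some color) || (pvDget d "size").isSome)

def pvExact (d : List (String × String)) (color : String) (size : String) : Bool :=
  pvDget d "color" == some color && pvDget d "size" == some size

def Pre_get_variant (details : List (List (String × String))) (color : String) (size : String) : Prop :=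
  if color = "" ∨ size = "" then details ≠ []
  else (details.takeWhile (pvOk · color)).any (pvExact · color size) ∨
       details.all (pvOk · color)
instance (details : List (List (String × String))) (color : String) (size : String) : Decidable (Pre_get_variant details color size) := by unfold Pre_get_variant; infer_instance

def pvWitness_get_variant : (List (List (String × String))) × String × String :=
  ([[("color", "red"), ("size", "M")], [("color", "blue"), ("size", "S")]], "blue", "S")

def Spec_get_variant (details : List (List (String × String))) (color : String) (size : String) (out : Option (List (String × String))) : Prop := out = get_variant_alt details color size
instance (details : List (List (String × String))) (color : String) (size : String) (out : Option (List (String × String))) : Decidable (Spec_get_variant details color size out) := by unfold Spec_get_variant; infer_instance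

-- ===== CLAIM (what is proved, stated in full; the proofs are below) =====
def Claim_equal_get_variant : Prop := ∀ (details : List (List (String × String))) (color : String) (size : String), Dom_get_variant details color size → Pre_get_variant details color size → Spec_get_variant details color size (get_variant details color size)

-- ===== LEMMAS AND PROOFS =====

-- the single pass equals: exact match if any, else fallback, else first color match
theorem pvGo_eq (details : List (List (String × String))) (color : String) (size : String)
    (fb : Option (List (String × String))) :
    pvGo details color size fb =
      match pvLoop1 details color size with
      | some d => some d
      | none => match fb with
                | some f => some f
                | none => pvLoop2 details color := by
  induction details generalizing fb with
  | nil => cases fb <;> simp [pvGo, pvLoop1, pvLoop2]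
  | cons d rest ih =>
    by_cases hc : pvDget d "color" == some color
    · by_cases hs : pvDget d "size" == some size
      · simp [pvGo, pvLoop1, hc, hs]
      · cases fb with
        | none =>
          rw [show pvGo (d :: rest) color size none =
                pvGo rest color size (some d) by simp [pvGo, hc, hs]]
          rw [ih]
          simp [pvLoop1, pvLoop2, hc, hs]
        | some f =>
          rw [show pvGo (d :: rest) color size (some f) =
                pvGo rest color size (some f) by simp [pvGo, hc, hs]]
          rw [ih]
          simp [pvLoop1, hc, hs]
    · rw [show pvGo (d :: rest) color size fb = pvGo rest color size fb by
        simp [pvGo, hc]]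
      rw [ih]
      simp [pvLoop1, pvLoop2, hc]

-- ===== VERDICT (by name: the statement is the Claim_ definition above) =====
theorem get_variant_spec : Claim_equal_get_variant := by
  intro details color size _ _
  unfold Spec_get_variant get_variant get_variant_alt
  by_cases h : color = "" ∨ size = ""
  · simp [h]
  · simp only [h, if_false]
    rw [pvGo_eq]
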